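-- pv_equiv track=rewrite | github.com/JWray2k/Various-Coursework | CSCI_Gettysburg/Gettysburg.py | totalWordCount2
-- ===== SOURCE A (Python) =====
-- def totalWordCount2(full):
--     wordFrequency = {} # this is a dictionay, not a set
--     for word in full.split():
--         if word not in wordFrequency:
--             wordFrequency[word] = 1
--         else:
--             wordFrequency[word] += 1
--
--     totalWordCount = sum(wordFrequency.values())
--     return totalWordCount
-- ===== SOURCE B (Python) =====
-- def totalWordCount2(full):
--     # simpler: the number of tokens is just the length of the split list;
--     # no frequency table or second summation pass is needed
--     return len(full.split())
-- ===== Notes on version B (the rewrite author's own statement) =====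
-- stated objective: simpler
-- what changed: B drops the word-frequency dictionary and its summation pass entirely and returns len(full.split()) directly, since the histogram's value-sum equals the token count.
import Mathlib
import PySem

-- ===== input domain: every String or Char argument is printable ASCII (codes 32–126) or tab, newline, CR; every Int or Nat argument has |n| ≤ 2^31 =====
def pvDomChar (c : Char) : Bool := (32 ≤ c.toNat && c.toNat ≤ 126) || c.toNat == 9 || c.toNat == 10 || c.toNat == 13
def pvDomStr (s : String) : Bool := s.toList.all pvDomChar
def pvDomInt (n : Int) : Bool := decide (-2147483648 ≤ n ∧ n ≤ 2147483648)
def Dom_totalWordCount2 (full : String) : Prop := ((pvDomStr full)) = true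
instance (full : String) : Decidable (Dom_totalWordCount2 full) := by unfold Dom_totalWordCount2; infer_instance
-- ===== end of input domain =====

-- B replaces A's word-frequency dictionary and summation pass by returning the length of the split list directly (simpler).

-- ===== PORT A =====
def totalWordCount2 (full : String) : Int :=
  let wordFrequency : PySem.Dict String Int :=
    (PySem.Str.split₀ full).foldl
      (fun d word =>
        if d.contains word = false then d.insert word 1
        else d.insert word (d.getD word 0 + 1))
      PySem.Dict.empty
  wordFrequency.values.sum

-- ===== PORT B =====
def totalWordCount2_alt (full : String) : Int :=
  ((PySem.Str.split₀ full).length : Int)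

-- ===== PRECONDITION & SPEC =====
def Spec_totalWordCount2 (full : String) (out : Int) : Prop := out = totalWordCount2_alt full
instance (full : String) (out : Int) : Decidable (Spec_totalWordCount2 full out) := by unfold Spec_totalWordCount2; infer_instance

-- ===== CLAIM (what is proved, stated in full; the proofs are below) =====
def Claim_equal_totalWordCount2 : Prop := ∀ (full : String), Dom_totalWordCount2 full → Spec_totalWordCount2 full (totalWordCount2 full)

-- ===== LEMMAS AND PROOFS =====

-- A's loop body equals the canonical counter step (the not-contains branch inserts 1 = getD 0 + 1).
theorem step_eq (d : PySem.Dict String Int) (w : String) :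
    (if d.contains w = false then d.insert w 1 else d.insert w (d.getD w 0 + 1))
      = d.insert w (d.getD w 0 + 1) := by
  by_cases h : d.contains w = false
  · simp [h, PySem.Dict.getD_of_not_contains]
  · simp [h]

-- the sum of the distinct-word counts is the number of words
theorem sum_counts (xs : List String) :
    ((PySem.Set.ofList xs).map (fun k => (xs.count k : Int))).sum = (xs.length : Int) := by
  have hperm : (PySem.Set.ofList xs).Perm xs.dedup := by
    rw [List.perm_ext_iff_of_nodup (PySem.Set.nodup_ofList xs) xs.nodup_dedup]
    intro a
    simp [PySem.Set.mem_ofList, List.mem_dedup]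
  have hmap := (hperm.map (fun k => (xs.count k : Int))).sum_eq
  rw [hmap]
  rw [← List.sum_map_count_dedup_eq_length xs, Nat.cast_list_sum, List.map_map]
  rfl

theorem totalWordCount2_eq (full : String) :
    totalWordCount2 full = totalWordCount2_alt full := by
  unfold totalWordCount2 totalWordCount2_alt
  have hstep : (PySem.Str.split₀ full).foldl
      (fun d word =>
        if d.contains word = false then d.insert word 1
        else d.insert word (d.getD word 0 + 1))
      PySem.Dict.empty
      = PySem.Dict.counter (PySem.Str.split₀ full) := by
    rw [show (fun (d : PySem.Dict String Int) word =>
        if d.contains word = false then d.insert word 1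
        else d.insert word (d.getD word 0 + 1))
        = fun d word => d.insert word (d.getD word 0 + 1) from funext fun d => funext fun w => step_eq d w]
    exact PySem.Dict.foldl_insert_getD_add_one_eq_counter (PySem.Str.split₀ full)
  rw [hstep]
  show (PySem.Dict.counter (PySem.Str.split₀ full)).values.sum = ((PySem.Str.split₀ full).length : Int)
  have hv : (PySem.Dict.counter (PySem.Str.split₀ full)).values
      = (PySem.Set.ofList (PySem.Str.split₀ full)).map
          (fun k => ((PySem.Str.split₀ full).count k : Int)) := by
    simp [PySem.Dict.values, PySem.Dict.items_counter, List.map_map, Function.comp]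
  rw [hv, sum_counts]

-- ===== VERDICT (by name: the statement is the Claim_ definition above) =====
theorem totalWordCount2_spec : Claim_equal_totalWordCount2 := by
  intro full _
  unfold Spec_totalWordCount2
  exact totalWordCount2_eq full
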